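-- pv_equiv track=rewrite | github.com/AbhiramDwivedi/docrag | backend/src/ingestion/extractors/email_extractor.py | _get_thread_date_range
-- ===== SOURCE A (Python) =====
-- from typing import List, Dict, Any, Optional, Tuple, Union
--
-- def _get_thread_date_range(thread_data: List[Dict[str, Any]]) -> str:
--     """Get date range of thread."""
--     dates = []
--     for msg in thread_data:
--         date_sent = msg.get('date_sent')
--         if date_sent:
--             dates.append(date_sent)
--
--     if not dates:
--         return "Unknown"
--     elif len(dates) == 1:
--         return dates[0][:10]  # Just the date part
--     else:
--         return f"{min(dates)[:10]} to {max(dates)[:10]}"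
-- ===== SOURCE B (Python) =====
-- def _get_thread_date_range(thread_data):
--     """Get date range of thread (single pass, running min/max, no intermediate list)."""
--     count = 0
--     mn = mx = None
--     for msg in thread_data:
--         d = msg.get('date_sent')
--         if d:
--             count += 1
--             if mn is None:
--                 mn = mx = d
--             else:
--                 if d < mn:
--                     mn = d
--                 if mx < d:
--                     mx = d
--     if count == 0:
--         return "Unknown"
--     if count == 1:
--         return mn[:10]
--     return f"{mn[:10]} to {mx[:10]}"
-- ===== Notes on version B (the rewrite author's own statement) =====
-- stated objective: alternative
-- what changed: Replaces A's build-a-list-then-min/max/len approach with a single pass that keeps only a count and running min/max strings, branching on the count at the end; no intermediate list is ever built.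
import Mathlib
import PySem

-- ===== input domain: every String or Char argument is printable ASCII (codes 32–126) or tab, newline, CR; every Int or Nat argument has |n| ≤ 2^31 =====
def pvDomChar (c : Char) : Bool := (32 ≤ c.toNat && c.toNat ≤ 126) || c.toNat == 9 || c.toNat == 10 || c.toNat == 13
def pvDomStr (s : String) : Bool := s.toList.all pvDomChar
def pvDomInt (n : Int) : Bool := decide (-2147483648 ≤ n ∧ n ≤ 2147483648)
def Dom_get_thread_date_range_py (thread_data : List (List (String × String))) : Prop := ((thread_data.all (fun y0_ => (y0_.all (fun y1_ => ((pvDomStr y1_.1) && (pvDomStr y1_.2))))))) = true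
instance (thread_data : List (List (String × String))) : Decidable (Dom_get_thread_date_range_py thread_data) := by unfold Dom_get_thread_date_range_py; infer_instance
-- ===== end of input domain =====

-- B replaces A's intermediate dates list with a single pass keeping a count and running min/max (alternative decomposition, O(1) extra space).


-- ===== PORT A =====
-- one loop step of A: date_sent = msg.get('date_sent'); if date_sent: dates.append(date_sent)
def pvStepA (acc : List String) (msg : List (String × String)) : List String :=
  match (PySem.Dict.mk msg).get? "date_sent" with
  | some d => if d = "" then acc else acc ++ [d]
  | none => acc

def get_thread_date_range_py (thread_data : List (List (String × String))) : String :=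
  let dates := thread_data.foldl pvStepA []
  if dates = [] then "Unknown"
  else if dates.length = 1 then PySem.Str.slice ((PySem.List.pyGet? dates 0).getD "") none (some 10)
  else PySem.Str.slice ((PySem.List.min? dates (fun x => x)).getD "") none (some 10) ++ " to "
       ++ PySem.Str.slice ((PySem.List.max? dates (fun x => x)).getD "") none (some 10)

-- ===== PORT B =====
-- one loop step of B: count / running min / running max (count = 0 plays 'mn is None')
def pvStepB (st : Nat × String × String) (msg : List (String × String)) : Nat × String × String :=
  match (PySem.Dict.mk msg).get? "date_sent" with
  | some d => if d = "" then st
      else (st.1 + 1, (if st.1 = 0 then d else min st.2.1 d), (if st.1 = 0 then d else max st.2.2 d))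
  | none => st

def get_thread_date_range_py_alt (thread_data : List (List (String × String))) : String :=
  let st := thread_data.foldl pvStepB (0, "", "")
  if st.1 = 0 then "Unknown"
  else if st.1 = 1 then PySem.Str.slice st.2.1 none (some 10)
  else PySem.Str.slice st.2.1 none (some 10) ++ " to " ++ PySem.Str.slice st.2.2 none (some 10)

-- ===== PRECONDITION & SPEC =====
def Spec_get_thread_date_range_py (thread_data : List (List (String × String))) (out : String) : Prop := out = get_thread_date_range_py_alt thread_data
instance (thread_data : List (List (String × String))) (out : String) : Decidable (Spec_get_thread_date_range_py thread_data out) := by unfold Spec_get_thread_date_range_py; infer_instance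

-- ===== CLAIM (what is proved, stated in full; the proofs are below) =====
def Claim_equal_get_thread_date_range_py : Prop := ∀ (thread_data : List (List (String × String))), Dom_get_thread_date_range_py thread_data → Spec_get_thread_date_range_py thread_data (get_thread_date_range_py thread_data)

-- ===== LEMMAS AND PROOFS =====

-- the date extracted from one message (helper for the proofs only)
def pvExt (msg : List (String × String)) : List String :=
  match (PySem.Dict.mk msg).get? "date_sent" with
  | some d => if d = "" then [] else [d]
  | none => []

theorem foldA_eq (td : List (List (String × String))) : ∀ acc,
    td.foldl pvStepA acc = acc ++ td.flatMap pvExt := by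
  induction td with
  | nil => simp
  | cons m td ih =>
    intro acc
    simp only [List.foldl_cons, List.flatMap_cons, ih, pvStepA, pvExt]
    cases (PySem.Dict.mk m).get? "date_sent" with
    | none => simp
    | some d => by_cases hd : d = "" <;> simp [hd]

theorem foldB_nonempty (td : List (List (String × String))) : ∀ (h : String) (t : List String),
    td.foldl pvStepB (t.length + 1, t.foldl min h, t.foldl max h)
      = ((t ++ td.flatMap pvExt).length + 1,
         (t ++ td.flatMap pvExt).foldl min h,
         (t ++ td.flatMap pvExt).foldl max h) := by
  induction td with
  | nil => simp
  | cons m td ih =>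
    intro h t
    simp only [List.foldl_cons, List.flatMap_cons]
    have hstep : pvStepB (t.length + 1, t.foldl min h, t.foldl max h) m
        = ((t ++ pvExt m).length + 1, (t ++ pvExt m).foldl min h, (t ++ pvExt m).foldl max h) := by
      simp only [pvStepB, pvExt]
      cases (PySem.Dict.mk m).get? "date_sent" with
      | none => simp
      | some d =>
        by_cases hd : d = "" <;> simp [hd, List.foldl_append]
    rw [hstep, ih h (t ++ pvExt m)]
    simp [List.append_assoc]

theorem foldB_eq (td : List (List (String × String))) :
    td.foldl pvStepB (0, "", "")
      = (match td.flatMap pvExt with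
         | [] => (0, "", "")
         | h :: t => (t.length + 1, t.foldl min h, t.foldl max h)) := by
  induction td with
  | nil => simp
  | cons m td ih =>
    simp only [List.foldl_cons, List.flatMap_cons]
    have hext : pvStepB (0, "", "") m
        = (match pvExt m with
           | [] => ((0 : Nat), "", "")
           | [d] => (1, d, d)
           | _ => (0, "", "")) := by
      simp only [pvStepB, pvExt]
      cases (PySem.Dict.mk m).get? "date_sent" with
      | none => rfl
      | some d => by_cases hd : d = "" <;> simp [hd]
    rcases hm : pvExt m with _ | ⟨d, rest⟩
    · rw [hext, hm]; simp only [List.nil_append]; exact ih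
    · have hrest : rest = [] := by
        simp only [pvExt] at hm
        split at hm <;> (try split at hm) <;> simp_all
      subst hrest
      rw [hext, hm]
      have := foldB_nonempty td d ([] : List String)
      simp only [List.nil_append] at this; exact this

-- ===== VERDICT =====
theorem get_thread_date_range_py_spec : Claim_equal_get_thread_date_range_py := by
  unfold Claim_equal_get_thread_date_range_py Spec_get_thread_date_range_py
  intro td _
  unfold get_thread_date_range_py get_thread_date_range_py_alt
  rw [foldA_eq td [], foldB_eq td]
  simp only [List.nil_append]
  rcases hd : td.flatMap pvExt with _ | ⟨d1, _ | ⟨d2, rest⟩⟩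
  · simp
  · simp [PySem.List.pyGet?, PySem.List.pyIdx?]
  · simp only []
    have h1 : (d1 :: d2 :: rest) ≠ ([] : List String) := by simp
    have h2 : (d1 :: d2 :: rest).length ≠ 1 := by simp
    rw [if_neg h1, if_neg (by simpa using h2)]
    have hmin := PySem.List.min?_id_cons (x := d1) (t := d2 :: rest)
    have hmax := PySem.List.max?_id_cons (x := d1) (t := d2 :: rest)
    simp only [hmin, hmax, Option.getD_some, List.length_cons]
    simp
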